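-- pv_equiv track=rewrite | github.com/jarvislam1999/CMSSW-12100-Homework | pp/kattis/torn2pieces.py | station_link
-- ===== SOURCE A (Python) =====
-- def station_link(pieces):
--     l_dict = {}
--     for p in pieces:
--         for s in p:
--             if (s not in l_dict):
--                 l_dict[s] = []
--             if (s not in l_dict[p[0]] and s != p[0]):
--                 l_dict[p[0]].append(s)
--             if (p[0] not in l_dict[s] and s != p[0]):
--                 l_dict[s].append(p[0])
--
--     return l_dict
-- ===== SOURCE B (Python) =====
-- def _dedup(v):
--     seen = set()
--     out = []
--     for x in v:
--         if x not in seen: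
--             seen.add(x)
--             out.append(x)
--     return out
--
--
-- def station_link(pieces):
--     adj = {}
--     for p in pieces:
--         if not p:
--             continue
--         head = p[0]
--         for s in p:
--             adj.setdefault(s, [])
--         rest = [s for s in p if s != head]
--         adj[head].extend(rest)
--         for s in rest:
--             adj[s].append(head)
--     return {k: _dedup(v) for k, v in adj.items()}
-- ===== Notes on version B (the rewrite author's own statement) =====
-- stated objective: faster
-- what changed: A interleaves per-element membership scans of the growing adjacency lists inside one loop; B builds the lists duplicate-tolerantly in bulk passes (setdefault all keys, extend the head's list, append the head to each other station's list) and collapses every list with a single order-preserving seen-set dedup pass at the end.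
import Mathlib
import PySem

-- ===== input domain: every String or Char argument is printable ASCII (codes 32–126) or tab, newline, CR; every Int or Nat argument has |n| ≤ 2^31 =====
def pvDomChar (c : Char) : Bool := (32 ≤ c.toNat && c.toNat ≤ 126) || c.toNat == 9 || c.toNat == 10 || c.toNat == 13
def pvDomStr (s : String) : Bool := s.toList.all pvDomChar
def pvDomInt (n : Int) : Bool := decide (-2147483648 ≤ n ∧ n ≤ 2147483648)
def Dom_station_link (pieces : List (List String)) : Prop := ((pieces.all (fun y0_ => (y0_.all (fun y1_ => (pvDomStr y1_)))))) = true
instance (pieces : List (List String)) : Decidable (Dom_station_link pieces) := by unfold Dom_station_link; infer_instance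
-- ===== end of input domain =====

-- B replaces A's interleaved per-element membership checks by a two-phase build:
-- duplicate-tolerant setdefault/extend/append passes, then one order-preserving dedup pass per list.

-- ===== PORT A =====
-- the three statements of A's inner loop body, split for readability; h is p[0]
-- (the body only runs when p ≠ [], so headD's default is never used, and
--  l_dict[p[0]] / l_dict[s] are existing keys at these points in every Python run, so getD's default [] is never read).
def step1 (d : PySem.Dict String (List String)) (s : String) : PySem.Dict String (List String) :=
  if d.contains s then d else d.insert s []

def step23 (h s : String) (d : PySem.Dict String (List String)) : PySem.Dict String (List String) :=
  let d := if s ∉ d.getD h [] ∧ s ≠ h then d.modify h [] (· ++ [s]) else d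
  if h ∉ d.getD s [] ∧ s ≠ h then d.modify s [] (· ++ [h]) else d

def aStep (h : String) (d : PySem.Dict String (List String)) (s : String) : PySem.Dict String (List String) :=
  step23 h s (step1 d s)

def station_link (pieces : List (List String)) : List (String × List String) :=
  (pieces.foldl (fun d p => p.foldl (aStep (p.headD "")) d) PySem.Dict.empty).items

-- ===== PORT B =====
-- Source B's _dedup: seen set + output list, keep first occurrences
def dedupAlt (v : List String) : List String :=
  (v.foldl (fun (acc : PySem.Set String × List String) x =>
      if x ∈ acc.1 then acc else (acc.1.add x, acc.2 ++ [x]))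
    (([] : PySem.Set String), [])).2

-- Source B's per-piece phase-1 update (head is a key after the setdefault pass, so modify's default [] is never read)
def bPiece (r : PySem.Dict String (List String)) (p : List String) : PySem.Dict String (List String) :=
  match p with
  | [] => r
  | head :: _ =>
    let r := p.foldl (fun r s => r.setdefault s []) r
    let rest := p.filter (fun s => s ≠ head)
    let r := r.modify head [] (· ++ rest)
    rest.foldl (fun r s => r.modify s [] (· ++ [head])) r

def station_link_alt (pieces : List (List String)) : List (String × List String) :=
  let adj := pieces.foldl bPiece PySem.Dict.empty
  (adj.items.foldl (fun (o : PySem.Dict String (List String)) kv => o.insert kv.1 (dedupAlt kv.2))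
    PySem.Dict.empty).items

-- ===== PRECONDITION & SPEC =====
def Spec_station_link (pieces : List (List String)) (out : List (String × List String)) : Prop := out = station_link_alt pieces
instance (pieces : List (List String)) (out : List (String × List String)) : Decidable (Spec_station_link pieces out) := by unfold Spec_station_link; infer_instance

-- ===== CLAIM (what is proved, stated in full; the proofs are below) =====
def Claim_equal_station_link : Prop := ∀ (pieces : List (List String)), Dom_station_link pieces → Spec_station_link pieces (station_link pieces)

-- ===== LEMMAS AND PROOFS =====

-- first-occurrence dedup relative to an accumulator (the value shape A's membership checks maintain)
def ddGo (acc : List String) (xs : List String) : List String :=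
  xs.foldl (fun a x => if x ∈ a then a else a ++ [x]) acc

theorem ddGo_append (acc xs ys : List String) : ddGo acc (xs ++ ys) = ddGo (ddGo acc xs) ys := by
  simp [ddGo, List.foldl_append]

theorem ddGo_cons (acc : List String) (x : String) (xs : List String) :
    ddGo acc (x :: xs) = ddGo (if x ∈ acc then acc else acc ++ [x]) xs := rfl

theorem dedupAlt_aux (v : List String) (s : PySem.Set String) (out : List String)
    (h : ∀ x, x ∈ s ↔ x ∈ out) :
    (v.foldl (fun (acc : PySem.Set String × List String) x =>
      if x ∈ acc.1 then acc else (acc.1.add x, acc.2 ++ [x])) (s, out)).2 = ddGo out v := by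
  induction v generalizing s out with
  | nil => rfl
  | cons x v ih =>
    simp only [List.foldl_cons, ddGo]
    by_cases hx : x ∈ out
    · rw [if_pos ((h x).mpr hx), if_pos hx]
      exact ih s out h
    · rw [if_neg (fun hc => hx ((h x).mp hc)), if_neg hx]
      exact ih _ _ (fun y => by simp [PySem.Set.mem_add, h y])

theorem dedupAlt_eq_ddGo (v : List String) : dedupAlt v = ddGo [] v :=
  dedupAlt_aux v [] [] (fun _ => Iff.rfl)

theorem ddGo_const (h : String) (l : List String) (acc : List String) (hne : l ≠ []) :
    ddGo acc (l.map fun _ => h) = if h ∈ acc then acc else acc ++ [h] := by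
  induction l generalizing acc with
  | nil => exact absurd rfl hne
  | cons x l ih =>
    simp only [List.map_cons, ddGo, List.foldl_cons]
    by_cases hl : l = []
    · subst hl; simp
    · rw [show ∀ a, List.foldl (fun a x => if x ∈ a then a else a ++ [x]) a (l.map fun _ => h)
            = ddGo a (l.map fun _ => h) from fun _ => rfl, ih _ hl]
      by_cases hh : h ∈ acc <;> simp [hh]

-- ---- A-side: values and keys through the inner loop ----

theorem getD_step1 (d : PySem.Dict String (List String)) (s k : String) :
    (step1 d s).getD k [] = d.getD k [] := by
  unfold step1
  by_cases hc : d.contains s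
  · rw [if_pos hc]
  · rw [if_neg hc, PySem.Dict.getD_insert]
    split_ifs with hk
    · subst hk; rw [PySem.Dict.getD_of_not_contains _ _ (by simpa using hc)]
    · rfl

theorem step23_getD (d : PySem.Dict String (List String)) (h s k : String) :
    (step23 h s d).getD k [] =
      if k = h then (if s ∉ d.getD h [] ∧ s ≠ h then d.getD h [] ++ [s] else d.getD h [])
      else if k = s ∧ s ≠ h ∧ h ∉ d.getD k [] then d.getD k [] ++ [h] else d.getD k [] := by
  unfold step23
  by_cases hsh : s = h
  · subst hsh
    simp only [ne_eq, not_true_eq_false, and_false, if_false]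
    by_cases hk : k = s <;> simp [hk]
  · by_cases c : s ∈ d.getD h []
    · have e1 : (if s ∉ d.getD h [] ∧ s ≠ h then d.modify h [] (· ++ [s]) else d) = d :=
        if_neg (by simp [c])
      simp only [e1]
      by_cases c3 : h ∈ d.getD s []
      · rw [if_neg (by simp [c3])]
        by_cases hk : k = h
        · simp [hk, c]
        · by_cases hks : k = s <;> simp [hk, hks, c3, hsh]
      · rw [if_pos ⟨c3, hsh⟩, PySem.Dict.getD_modify]
        by_cases hk : k = s
        · subst hk; rw [if_pos rfl, if_neg hsh, if_pos ⟨rfl, hsh, c3⟩]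
        · rw [if_neg hk]
          by_cases hkh : k = h <;> simp [hkh, hk, c]
    · have e1 : (if s ∉ d.getD h [] ∧ s ≠ h then d.modify h [] (· ++ [s]) else d)
          = d.modify h [] (· ++ [s]) := if_pos ⟨c, hsh⟩
      simp only [e1]
      have g2 : ∀ x, ((d.modify h [] (· ++ [s])).getD x []) =
          if x = h then d.getD h [] ++ [s] else d.getD x [] := by
        intro x; rw [PySem.Dict.getD_modify]
      have g2s : ((d.modify h [] (· ++ [s])).getD s []) = d.getD s [] := by
        rw [g2, if_neg hsh]
      by_cases c3 : h ∈ d.getD s []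
      · rw [if_neg (by rw [g2s]; simp [c3])]
        rw [g2]
        by_cases hk : k = h
        · simp [hk, c, hsh]
        · rw [if_neg hk]
          by_cases hks : k = s <;> simp [hk, hks, c3, hsh]
      · rw [if_pos ⟨by rw [g2s]; simpa using c3, hsh⟩, PySem.Dict.getD_modify]
        by_cases hk : k = s
        · subst hk
          rw [if_pos rfl, g2s, if_neg hsh, if_pos ⟨rfl, hsh, c3⟩]
        · rw [if_neg hk, g2]
          by_cases hkh : k = h
          · simp [hkh, c, hsh]
          · simp [hkh, hk]

theorem aStep_getD (h : String) (d : PySem.Dict String (List String)) (s k : String) :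
    (aStep h d s).getD k [] =
      if k = h then (if s ∉ d.getD h [] ∧ s ≠ h then d.getD h [] ++ [s] else d.getD h [])
      else if k = s ∧ s ≠ h ∧ h ∉ d.getD k [] then d.getD k [] ++ [h] else d.getD k [] := by
  unfold aStep
  rw [step23_getD]
  simp only [getD_step1]

theorem aFold_getD (t : List String) (h : String) (d : PySem.Dict String (List String)) (k : String) :
    (t.foldl (aStep h) d).getD k [] =
      if k = h then ddGo (d.getD h []) (t.filter (fun s => s ≠ h))
      else if k ∈ t ∧ h ∉ d.getD k [] then d.getD k [] ++ [h] else d.getD k [] := by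
  induction t generalizing d with
  | nil => by_cases hk : k = h <;> simp [hk, ddGo]
  | cons s t ih =>
    rw [List.foldl_cons, ih (aStep h d s), List.filter_cons]
    by_cases hk : k = h
    · subst hk
      rw [if_pos rfl, if_pos rfl]
      have hA : (aStep k d s).getD k [] =
          if s ∉ d.getD k [] ∧ s ≠ k then d.getD k [] ++ [s] else d.getD k [] := by
        rw [aStep_getD, if_pos rfl]
      by_cases hsh : s = k
      · rw [hA, if_neg (by simp [hsh]), if_neg (by simp [hsh])]
      · rw [if_pos (by simp [hsh]), ddGo_cons]
        by_cases hm : s ∈ d.getD k []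
        · rw [hA, if_neg (by simp [hm]), if_pos hm]
        · rw [hA, if_pos ⟨hm, hsh⟩, if_neg hm]
    · rw [if_neg hk, if_neg hk]
      have hA : (aStep h d s).getD k [] =
          if k = s ∧ s ≠ h ∧ h ∉ d.getD k [] then d.getD k [] ++ [h] else d.getD k [] := by
        rw [aStep_getD, if_neg hk]
      rw [hA]
      by_cases hks : k = s
      · subst hks
        by_cases hm : h ∈ d.getD k []
        · rw [show (if k = k ∧ k ≠ h ∧ h ∉ d.getD k [] then d.getD k [] ++ [h] else d.getD k [])
              = d.getD k [] from if_neg (by simp [hm]),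
            if_neg (by simp [hm]), if_neg (by simp [hm])]
        · rw [show (if k = k ∧ k ≠ h ∧ h ∉ d.getD k [] then d.getD k [] ++ [h] else d.getD k [])
              = d.getD k [] ++ [h] from if_pos ⟨rfl, hk, hm⟩,
            if_neg (by simp), if_pos ⟨by simp, hm⟩]
      · rw [show (if k = s ∧ s ≠ h ∧ h ∉ d.getD k [] then d.getD k [] ++ [h] else d.getD k [])
              = d.getD k [] from if_neg (by simp [hks])]
        by_cases hmt : k ∈ t
        · by_cases hm : h ∈ d.getD k []
          · rw [if_neg (by simp [hm]), if_neg (by simp [hm])]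
          · rw [if_pos ⟨hmt, hm⟩, if_pos ⟨by simp [hmt], hm⟩]
        · rw [if_neg (by simp [hmt]), if_neg (by simp [hmt, hks])]

theorem keys_step1 (d : PySem.Dict String (List String)) (s : String) :
    (step1 d s).keys = PySem.Set.add d.keys s := by
  unfold step1 PySem.Set.add
  by_cases hc : d.contains s
  · rw [if_pos hc, if_pos (by simpa [List.contains_iff_mem] using (PySem.Dict.contains_iff_mem_keys d s).mp hc)]
  · rw [if_neg hc, if_neg (by simp; intro hm; exact hc ((PySem.Dict.contains_iff_mem_keys d s).mpr hm)),
      PySem.Dict.keys_insert_of_not_contains _ _ (by simpa using hc)]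

theorem mem_keys_step1 (d : PySem.Dict String (List String)) (s x : String) (hx : x ∈ d.keys) :
    x ∈ (step1 d s).keys := by
  rw [keys_step1]; unfold PySem.Set.add; split_ifs <;> simp [hx]

theorem s_mem_keys_step1 (d : PySem.Dict String (List String)) (s : String) :
    s ∈ (step1 d s).keys := by
  rw [keys_step1]; unfold PySem.Set.add
  split_ifs with hc
  · simpa [List.contains_iff_mem] using hc
  · simp

theorem keys_modify_mem (d : PySem.Dict String (List String)) (k : String) (f : List String → List String)
    (hk : k ∈ d.keys) : (d.modify k [] f).keys = d.keys := by
  rw [PySem.Dict.keys_modify, PySem.Dict.keys_insert_of_contains _ _ ((PySem.Dict.contains_iff_mem_keys d k).mpr hk)]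

theorem keys_step23 (h s : String) (d : PySem.Dict String (List String))
    (hh : h ∈ d.keys) (hs : s ∈ d.keys) : (step23 h s d).keys = d.keys := by
  unfold step23
  dsimp only
  by_cases c1 : s ∉ d.getD h [] ∧ s ≠ h
  · rw [if_pos c1]
    have e := keys_modify_mem d h (· ++ [s]) hh
    split_ifs with c2
    · rw [keys_modify_mem _ s _ (by rw [e]; exact hs), e]
    · exact e
  · rw [if_neg c1]
    split_ifs with c2
    · rw [keys_modify_mem _ s _ hs]
    · rfl

theorem aStep_keys (h : String) (d : PySem.Dict String (List String)) (s : String)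
    (hh : h ∈ d.keys) : (aStep h d s).keys = PySem.Set.add d.keys s := by
  unfold aStep
  rw [keys_step23 h s _ (mem_keys_step1 d s h hh) (s_mem_keys_step1 d s), keys_step1]

theorem aFold_keys (t : List String) (h : String) (d : PySem.Dict String (List String))
    (hh : h ∈ d.keys) : (t.foldl (aStep h) d).keys = PySem.Set.update d.keys t := by
  induction t generalizing d with
  | nil => rfl
  | cons s t ih =>
    rw [List.foldl_cons, PySem.Set.update_cons, ← aStep_keys h d s hh]
    exact ih _ (by rw [aStep_keys h d s hh]; unfold PySem.Set.add; split_ifs <;> simp [hh])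

theorem aStep_self (h : String) (d : PySem.Dict String (List String)) :
    aStep h d h = step1 d h := by
  unfold aStep step23
  simp

-- ---- B-side: values and keys through one piece ----

theorem getD_sdStep (r : PySem.Dict String (List String)) (s k : String) :
    (r.setdefault s []).getD k [] = r.getD k [] := by
  by_cases hc : r.contains s
  · rw [PySem.Dict.setdefault_of_contains _ _ hc]
  · rw [PySem.Dict.setdefault_of_not_contains _ _ (by simpa using hc), PySem.Dict.getD_insert]
    split_ifs with hk
    · subst hk; rw [PySem.Dict.getD_of_not_contains _ _ (by simpa using hc)]
    · rfl

theorem keys_sdStep (r : PySem.Dict String (List String)) (s : String) :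
    (r.setdefault s []).keys = PySem.Set.add r.keys s := by
  unfold PySem.Set.add
  by_cases hc : r.contains s
  · rw [PySem.Dict.setdefault_of_contains _ _ hc,
      if_pos (by simpa [List.contains_iff_mem] using (PySem.Dict.contains_iff_mem_keys r s).mp hc)]
  · rw [PySem.Dict.setdefault_of_not_contains _ _ (by simpa using hc),
      if_neg (by simp; intro hm; exact hc ((PySem.Dict.contains_iff_mem_keys r s).mpr hm)),
      PySem.Dict.keys_insert_of_not_contains _ _ (by simpa using hc)]

theorem sd_getD (p : List String) (r : PySem.Dict String (List String)) (k : String) :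
    (p.foldl (fun r s => r.setdefault s []) r).getD k [] = r.getD k [] := by
  induction p generalizing r with
  | nil => rfl
  | cons s p ih => rw [List.foldl_cons, ih]; exact getD_sdStep r s k

theorem sd_keys (p : List String) (r : PySem.Dict String (List String)) :
    (p.foldl (fun r s => r.setdefault s []) r).keys = PySem.Set.update r.keys p := by
  induction p generalizing r with
  | nil => rfl
  | cons s p ih => rw [List.foldl_cons, PySem.Set.update_cons, ih, keys_sdStep]

theorem pass3_getD (rest : List String) (head : String) (r : PySem.Dict String (List String)) (k : String) :
    (rest.foldl (fun r s => r.modify s [] (· ++ [head])) r).getD k [] =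
      r.getD k [] ++ (rest.filter (fun s => s == k)).map (fun _ => head) := by
  have e : rest.foldl (fun r s => r.modify s [] (· ++ [head])) r
      = (rest.map (fun s => (s, head))).foldl (fun d q => d.modify q.1 [] (· ++ [q.2])) r := by
    rw [List.foldl_map]
  rw [e, PySem.Dict.getD_foldl_modify_append, List.filter_map, List.map_map]
  rfl

theorem pass3_keys (rest : List String) (head : String) (r : PySem.Dict String (List String))
    (hmem : ∀ s ∈ rest, s ∈ r.keys) :
    (rest.foldl (fun r s => r.modify s [] (· ++ [head])) r).keys = r.keys := by
  induction rest generalizing r with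
  | nil => rfl
  | cons s rest ih =>
    rw [List.foldl_cons]
    have hs : s ∈ r.keys := hmem s (by simp)
    rw [ih _ (fun x hx => by rw [keys_modify_mem r s _ hs]; exact hmem x (by simp [hx])),
      keys_modify_mem r s _ hs]

-- ---- the two phase-1 states stay related piece by piece ----

def StInv (d r : PySem.Dict String (List String)) : Prop :=
  d.keys = r.keys ∧ r.keys.Nodup ∧ ∀ k, d.getD k [] = ddGo [] (r.getD k [])

theorem bPiece_cons (r : PySem.Dict String (List String)) (head : String) (t : List String) :
    bPiece r (head :: t) =
      ((head :: t).filter (fun s => s ≠ head)).foldl (fun r s => r.modify s [] (· ++ [head]))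
        (((head :: t).foldl (fun r s => r.setdefault s []) r).modify head []
          (· ++ (head :: t).filter (fun s => s ≠ head))) := rfl

theorem stInv_piece (d r : PySem.Dict String (List String)) (p : List String) (hi : StInv d r) :
    StInv (p.foldl (aStep (p.headD "")) d) (bPiece r p) := by
  obtain ⟨hkeys, hnd, hval⟩ := hi
  match p with
  | [] => exact ⟨hkeys, hnd, hval⟩
  | head :: t =>
    rw [bPiece_cons]
    have hrest : (head :: t).filter (fun s => s ≠ head) = t.filter (fun s => s ≠ head) := by
      simp
    set rest := (head :: t).filter (fun s => s ≠ head) with hrdef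
    set r1 := (head :: t).foldl (fun r s => r.setdefault s []) r with hr1
    set r2 := r1.modify head [] (· ++ rest) with hr2
    set r3 := rest.foldl (fun r s => r.modify s [] (· ++ [head])) r2 with hr3
    -- B-side keys
    have hk1 : r1.keys = PySem.Set.update r.keys (head :: t) := sd_keys _ r
    have hheadmem : head ∈ r1.keys := by
      rw [hk1, PySem.Set.mem_update]; exact Or.inr (by simp)
    have hk2 : r2.keys = r1.keys := keys_modify_mem r1 head _ hheadmem
    have hrestmem : ∀ s ∈ rest, s ∈ r2.keys := by
      intro s hs
      rw [hk2, hk1, PySem.Set.mem_update]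
      exact Or.inr (List.mem_of_mem_filter hs)
    have hk3 : r3.keys = PySem.Set.update r.keys (head :: t) := by
      rw [hr3, pass3_keys _ _ _ hrestmem, hk2, hk1]
    -- B-side values
    have hv1 : ∀ k, r1.getD k [] = r.getD k [] := fun k => sd_getD _ r k
    have hv2 : ∀ k, r2.getD k [] = if k = head then r.getD head [] ++ rest else r.getD k [] := by
      intro k
      rw [hr2, PySem.Dict.getD_modify]
      split_ifs with hk
      · rw [hv1 head]
      · rw [hv1 k]
    have hv3 : ∀ k, r3.getD k [] =
        (if k = head then r.getD head [] ++ rest else r.getD k [])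
          ++ (rest.filter (fun s => s == k)).map (fun _ => head) := by
      intro k
      rw [hr3, pass3_getD, hv2]
    -- A-side
    have hAeq : (head :: t).foldl (aStep ((head :: t).headD "")) d
        = t.foldl (aStep head) (step1 d head) := by
      rw [List.headD_cons, List.foldl_cons, aStep_self]
    have hAkeys : (t.foldl (aStep head) (step1 d head)).keys = PySem.Set.update d.keys (head :: t) := by
      rw [aFold_keys t head _ (s_mem_keys_step1 d head), keys_step1, PySem.Set.update_cons]
    refine ⟨?_, ?_, ?_⟩
    · rw [hAeq, hAkeys, hk3, hkeys]
    · rw [hk3]; exact PySem.Set.nodup_update _ _ hnd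
    · intro k
      rw [hAeq, aFold_getD, hv3]
      simp only [getD_step1]
      by_cases hk : k = head
      · subst hk
        rw [if_pos rfl]
        have hfl : rest.filter (fun s => s == k) = [] := by
          rw [List.filter_eq_nil_iff]
          intro x hx
          have : x ≠ k := by
            have := List.of_mem_filter hx
            simpa using this
          simpa using this
        rw [hfl, List.map_nil, List.append_nil, if_pos rfl, ddGo_append, ← hval k, hrest]
      · rw [if_neg hk]
        by_cases hkt : k ∈ t
        · have hkrest : k ∈ rest := by
            rw [hrdef]
            exact List.mem_filter.mpr ⟨by simp [hkt], by simpa using hk⟩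
          have hfl : rest.filter (fun s => s == k) ≠ [] := by
            intro hnil
            have : k ∈ rest.filter (fun s => s == k) :=
              List.mem_filter.mpr ⟨hkrest, by simp⟩
            rw [hnil] at this
            exact absurd this (List.not_mem_nil)
          rw [ddGo_append, if_neg hk, ← hval k, ddGo_const head _ _ hfl]
          by_cases hm : head ∈ d.getD k []
          · rw [if_neg (by simp [hm]), if_pos hm]
          · rw [if_pos ⟨hkt, hm⟩, if_neg hm]
        · have hkrest : k ∉ rest := by
            rw [hrdef]
            intro hmem
            rcases List.mem_filter.mp hmem with ⟨hmem', _⟩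
            rcases List.mem_cons.mp hmem' with h1 | h2
            · exact hk h1
            · exact hkt h2
          have hfl : rest.filter (fun s => s == k) = [] := by
            rw [List.filter_eq_nil_iff]
            intro x hx hbeq
            exact hkrest (by simpa using (of_decide_eq_true hbeq) ▸ hx)
          rw [hfl, List.map_nil, List.append_nil, if_neg (by simp [hkt]), hval k, if_neg hk]

theorem stInv_fold (pieces : List (List String)) (d r : PySem.Dict String (List String)) (hi : StInv d r) :
    StInv (pieces.foldl (fun d p => p.foldl (aStep (p.headD "")) d) d) (pieces.foldl bPiece r) := by
  induction pieces generalizing d r with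
  | nil => exact hi
  | cons p pieces ih => exact ih _ _ (stInv_piece d r p hi)

-- ===== VERDICT (by name: the statement is the Claim_ definition above) =====
theorem station_link_spec : Claim_equal_station_link := by
  intro pieces _
  unfold Spec_station_link station_link station_link_alt
  obtain ⟨hkeys, hnd, hval⟩ := stInv_fold pieces PySem.Dict.empty PySem.Dict.empty
    ⟨rfl, PySem.Dict.nodup_keys_empty, fun _ => rfl⟩
  set dA := pieces.foldl (fun d p => p.foldl (aStep (p.headD "")) d) PySem.Dict.empty with hdA
  set rB := pieces.foldl bPiece PySem.Dict.empty with hrB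
  have hndfst : (rB.items.map (·.1)).Nodup := hnd
  have hfoldl : (rB.items.foldl (fun (o : PySem.Dict String (List String)) kv => o.insert kv.1 (dedupAlt kv.2))
      PySem.Dict.empty).items = PySem.Dict.empty.items ++ rB.items.map (fun kv => (kv.1, dedupAlt kv.2)) :=
    PySem.Dict.items_foldl_insert_fresh rB.items (·.1) (fun kv => dedupAlt kv.2) PySem.Dict.empty
      (fun _ _ => PySem.Dict.contains_empty _) hndfst
  rw [hfoldl]
  have hempty : (PySem.Dict.empty : PySem.Dict String (List String)).items = [] := rfl
  rw [hempty, List.nil_append,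
    PySem.Dict.items_eq_map_keys dA (hkeys ▸ hnd) [],
    PySem.Dict.items_eq_map_keys rB hnd [], List.map_map, hkeys]
  refine List.map_congr_left (fun k _ => ?_)
  simp only [Function.comp]
  rw [dedupAlt_eq_ddGo, ← hval k]
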